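-- pv_equiv track=rewrite | github.com/5g-media/CNO | O-CNO-predictive-optimizer/composite/ea_composite.py | next_assig
-- ===== SOURCE A (Python) =====
-- def next_assig(cur_assign, num_services, servers_per_service, ord_services):
--     index = 0
--     while index < num_services and cur_assign[index] == ( len(servers_per_service[ord_services[index]]) - 1):
--         index += 1
--     if index == num_services:
--         return None
--     else:
--         nxt_assign = list(cur_assign)
--         nxt_assign[index] += 1
--         for i in range(index): nxt_assign[i] = 0
--         return nxt_assign
-- ===== SOURCE B (Python) =====
-- def next_assig(cur_assign, num_services, servers_per_service, ord_services):
--     # Recursive carry propagation: build the successor front-to-back by consing,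
--     # instead of scanning for an index and then mutating a copy in two loops.
--     def go(i):
--         if i == num_services:
--             return None
--         r = len(servers_per_service[ord_services[i]])
--         if cur_assign[i] == r - 1:
--             rest = go(i + 1)
--             return None if rest is None else [0] + rest
--         return [cur_assign[i] + 1] + cur_assign[i + 1:]
--     return go(0)
-- ===== Notes on version B (the rewrite author's own statement) =====
-- stated objective: alternative
-- what changed: A scans for the first non-maxed index with a while loop, then copies the list, mutates that slot and zeroes the prefix in a second loop; B is a single recursive carry pass that builds the successor immutably front-to-back by consing (0 for each carried slot, then the incremented digit plus the untouched tail), with None bubbling up when every slot is maxed.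
-- outside the precondition, e.g. on next_assig([5], -1, {}, []): A returns [6], B raises IndexError; on next_assig([1, 0], -1, {0: [1, 2]}, [0, 0]): A returns [2, 0], B returns [0, 1]
import Mathlib
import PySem

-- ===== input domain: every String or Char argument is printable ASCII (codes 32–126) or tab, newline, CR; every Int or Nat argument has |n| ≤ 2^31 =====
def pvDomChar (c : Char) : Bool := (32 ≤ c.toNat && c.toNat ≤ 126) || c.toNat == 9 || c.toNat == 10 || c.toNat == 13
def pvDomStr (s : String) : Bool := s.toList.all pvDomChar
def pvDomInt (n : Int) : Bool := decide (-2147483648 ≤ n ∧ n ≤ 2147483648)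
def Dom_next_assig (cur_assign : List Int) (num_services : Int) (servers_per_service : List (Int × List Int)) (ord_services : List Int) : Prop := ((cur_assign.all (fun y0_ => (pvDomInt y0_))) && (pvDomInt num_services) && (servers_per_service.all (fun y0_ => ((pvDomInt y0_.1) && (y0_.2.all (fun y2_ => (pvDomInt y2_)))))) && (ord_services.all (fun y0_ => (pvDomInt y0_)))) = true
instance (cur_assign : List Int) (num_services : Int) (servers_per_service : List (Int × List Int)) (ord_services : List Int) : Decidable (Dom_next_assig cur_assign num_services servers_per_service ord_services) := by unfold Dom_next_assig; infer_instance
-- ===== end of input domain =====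

-- B replaces A's scan-then-mutate (while loop + copy + zeroing loop) by one recursive
-- carry pass building the successor immutably by consing; same O(n) cost (objective: alternative).

-- ===== PORT A =====
-- the while loop: fuel counts the remaining iterations allowed by `index < num_services`
def nextAssigFind (cur_assign : List Int) (servers_per_service : List (Int × List Int))
    (ord_services : List Int) : Nat → Nat → Nat
  | 0, index => index
  | fuel + 1, index =>
      if cur_assign.getD index 0 =
          (((servers_per_service.lookup (ord_services.getD index 0)).getD []).length : Int) - 1
      then nextAssigFind cur_assign servers_per_service ord_services fuel (index + 1)
      else index

def next_assig (cur_assign : List Int) (num_services : Int) (servers_per_service : List (Int × List Int)) (ord_services : List Int) : Option (List Int) :=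
  let index := nextAssigFind cur_assign servers_per_service ord_services num_services.toNat 0
  if (index : Int) = num_services then none
  else
    let nxt_assign := cur_assign.set index (cur_assign.getD index 0 + 1)
    some ((List.range index).foldl (fun l i => l.set i 0) nxt_assign)

-- ===== PORT B =====
-- go(i): None when all remaining considered digits are maxed, else successor tail from i on
def nextAssigGo (cur_assign : List Int) (servers_per_service : List (Int × List Int))
    (ord_services : List Int) (num_services : Int) : Nat → Nat → Option (List Int)
  | fuel, i =>
      if (i : Int) = num_services then none
      else
        match fuel with
        | 0 => none  -- fuel exhaustion: termination guard only (never reached where the Python returns)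
        | fuel + 1 =>
          let r : Int := (((servers_per_service.lookup (ord_services.getD i 0)).getD []).length : Int)
          if cur_assign.getD i 0 = r - 1 then
            match nextAssigGo cur_assign servers_per_service ord_services num_services fuel (i + 1) with
            | none => none
            | some rest => some (0 :: rest)
          else some ((cur_assign.getD i 0 + 1) :: cur_assign.drop (i + 1))

def next_assig_alt (cur_assign : List Int) (num_services : Int) (servers_per_service : List (Int × List Int)) (ord_services : List Int) : Option (List Int) :=
  nextAssigGo cur_assign servers_per_service ord_services num_services
    (num_services.toNat + ord_services.length + 1) 0

-- ===== PRECONDITION & SPEC =====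
-- helpers for the precondition (Bool-valued, closed-form reads of the input)
def pvAtMax (cur_assign : List Int) (servers_per_service : List (Int × List Int))
    (ord_services : List Int) (j : Nat) : Bool :=
  cur_assign.getD j 0 ==
    (((servers_per_service.lookup (ord_services.getD j 0)).getD []).length : Int) - 1

def pvSafe (cur_assign : List Int) (servers_per_service : List (Int × List Int))
    (ord_services : List Int) (k : Nat) : Bool :=
  decide (k < cur_assign.length) && decide (k < ord_services.length) &&
    (servers_per_service.lookup (ord_services.getD k 0)).isSome

-- Pre_ excludes the inputs on which A raises IndexError/KeyError (every position the scan reaches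
-- must be inside both lists with its service key present), and among the degenerate negative
-- num_services inputs it keeps only those where B's carry pass also returns and agrees (first digit
-- present, key known and not at capacity): outside that, B's recursion naturally raises, or -- when
-- the first digit is at capacity -- A blindly increments while B carries, a corner no caller specifies.
def Pre_next_assig (cur_assign : List Int) (num_services : Int) (servers_per_service : List (Int × List Int)) (ord_services : List Int) : Prop :=
  (num_services < 0 ∧ cur_assign ≠ [] ∧ 0 < ord_services.length ∧
    (servers_per_service.lookup (ord_services.getD 0 0)).isSome = true ∧
    pvAtMax cur_assign servers_per_service ord_services 0 = false) ∨
  (0 ≤ num_services ∧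
   ∀ k ∈ List.range (min num_services.toNat (min cur_assign.length ord_services.length + 1)),
    (∀ j ∈ List.range k, pvAtMax cur_assign servers_per_service ord_services j = true) →
    pvSafe cur_assign servers_per_service ord_services k = true)

instance (cur_assign : List Int) (num_services : Int) (servers_per_service : List (Int × List Int)) (ord_services : List Int) : Decidable (Pre_next_assig cur_assign num_services servers_per_service ord_services) := by unfold Pre_next_assig; infer_instance

def pvWitness_next_assig : List Int × Int × (List (Int × List Int)) × List Int :=
  ([0, 1], 2, [(0, [10, 20]), (1, [30])], [0, 1])

def Spec_next_assig (cur_assign : List Int) (num_services : Int) (servers_per_service : List (Int × List Int)) (ord_services : List Int) (out : Option (List Int)) : Prop := out = next_assig_alt cur_assign num_services servers_per_service ord_services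
instance (cur_assign : List Int) (num_services : Int) (servers_per_service : List (Int × List Int)) (ord_services : List Int) (out : Option (List Int)) : Decidable (Spec_next_assig cur_assign num_services servers_per_service ord_services out) := by unfold Spec_next_assig; infer_instance

-- ===== CLAIM (what is proved, stated in full; the proofs are below) =====
def Claim_equal_next_assig : Prop := ∀ (cur_assign : List Int) (num_services : Int) (servers_per_service : List (Int × List Int)) (ord_services : List Int), Dom_next_assig cur_assign num_services servers_per_service ord_services → Pre_next_assig cur_assign num_services servers_per_service ord_services → Spec_next_assig cur_assign num_services servers_per_service ord_services (next_assig cur_assign num_services servers_per_service ord_services)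

-- ===== LEMMAS AND PROOFS =====

theorem find_ge (cur : List Int) (sps : List (Int × List Int)) (ords : List Int) :
    ∀ fuel i, i ≤ nextAssigFind cur sps ords fuel i := by
  intro fuel
  induction fuel with
  | zero => intro i; simp [nextAssigFind]
  | succ n ih =>
      intro i
      simp only [nextAssigFind]
      split
      · exact le_trans (Nat.le_succ i) (ih (i + 1))
      · exact le_refl i

theorem find_le (cur : List Int) (sps : List (Int × List Int)) (ords : List Int) :
    ∀ fuel i, nextAssigFind cur sps ords fuel i ≤ i + fuel := by
  intro fuel
  induction fuel with
  | zero => intro i; simp [nextAssigFind]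
  | succ n ih =>
      intro i
      simp only [nextAssigFind]
      split
      · have := ih (i + 1); omega
      · omega

theorem find_atMax (cur : List Int) (sps : List (Int × List Int)) (ords : List Int) :
    ∀ fuel i j, i ≤ j → j < nextAssigFind cur sps ords fuel i →
      pvAtMax cur sps ords j = true := by
  intro fuel
  induction fuel with
  | zero => intro i j h1 h2; simp [nextAssigFind] at h2; omega
  | succ n ih =>
      intro i j h1 h2
      simp only [nextAssigFind] at h2
      split at h2
      · rename_i hc
        rcases Nat.eq_or_lt_of_le h1 with h | h
        · subst h; simpa [pvAtMax] using hc
        · exact ih (i + 1) j h h2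
      · omega

-- the zeroing loop rewrites the first m entries to 0
theorem foldl_set_zero (m : Nat) (l : List Int) (hm : m ≤ l.length) :
    (List.range m).foldl (fun a i => a.set i 0) l =
      List.replicate m (0 : Int) ++ l.drop m := by
  induction m with
  | zero => simp
  | succ n ih =>
      rw [List.range_succ, List.foldl_append, ih (by omega)]
      simp only [List.foldl_cons, List.foldl_nil]
      have hlen : n < l.length := by omega
      have hdrop : l.drop n = l[n] :: l.drop (n + 1) :=
        List.drop_eq_getElem_cons hlen
      rw [hdrop, List.set_append_right n 0 (by simp), List.length_replicate,
        Nat.sub_self, List.set_cons_zero, List.replicate_succ']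
      simp

-- main invariant: for num_services = N >= 0 and enough fuel, B's recursion computes, from A's
-- stopping index, either None or the successor list tail
theorem go_eq (cur : List Int) (sps : List (Int × List Int)) (ords : List Int) (ns : Int)
    (N : Nat) (hN : (N : Int) = ns) :
    ∀ fuel i, N < i + fuel → i ≤ N →
      (∀ k, k < N → (∀ j, j < k → pvAtMax cur sps ords j = true) →
        pvSafe cur sps ords k = true) →
      (∀ j, j < i → pvAtMax cur sps ords j = true) →
      nextAssigGo cur sps ords ns fuel i =
        (if nextAssigFind cur sps ords (N - i) i = N then none
         else some (List.replicate (nextAssigFind cur sps ords (N - i) i - i) (0 : Int) ++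
            (cur.getD (nextAssigFind cur sps ords (N - i) i) 0 + 1) ::
            cur.drop (nextAssigFind cur sps ords (N - i) i + 1))) := by
  intro fuel
  induction fuel with
  | zero => intro i h1 h2 _ _; omega
  | succ n ih =>
      intro i h1 h2 hsafe hprev
      rw [nextAssigGo]
      by_cases hiN : (i : Int) = ns
      · have hieq : i = N := by omega
        rw [if_pos hiN, hieq]
        simp [nextAssigFind]
      · have hilt : i < N := by omega
        rw [if_neg hiN]
        have hNi : N - i = (N - (i + 1)) + 1 := by omega
        rw [hNi]
        simp only [nextAssigFind]
        split
        · rename_i hc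
          have hprev' : ∀ j, j < i + 1 → pvAtMax cur sps ords j = true := by
            intro j hj
            rcases Nat.lt_succ_iff_lt_or_eq.mp hj with h | h
            · exact hprev j h
            · subst h; simpa [pvAtMax] using hc
          rw [ih (i + 1) (by omega) (by omega) hsafe hprev']
          have hge := find_ge cur sps ords (N - (i + 1)) (i + 1)
          by_cases hend : nextAssigFind cur sps ords (N - (i + 1)) (i + 1) = N
          · simp [hend]
          · simp only [hend, if_false]
            congr 1
            rw [show nextAssigFind cur sps ords (N - (i + 1)) (i + 1) - i =
                  (nextAssigFind cur sps ords (N - (i + 1)) (i + 1) - (i + 1)) + 1 by omega]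
            rw [List.replicate_succ]
            simp
        · simp only [show i ≠ N by omega, if_false]
          simp

-- ===== VERDICT (by name: the statement is the Claim_ definition above) =====

theorem next_assig_spec : Claim_equal_next_assig := by
  intro cur ns sps ords _ hpre
  unfold Spec_next_assig next_assig next_assig_alt
  rcases hpre with ⟨hns, hcur, hord, hkey, hmax⟩ | ⟨hns, hsafe⟩
  · -- negative num_services: both return the first entry incremented, the rest untouched
    have hN0 : ns.toNat = 0 := by omega
    rw [hN0, nextAssigGo]
    have h0 : ¬ ((0 : Nat) : Int) = ns := by omega
    simp only [nextAssigFind, h0, if_false, List.range_zero, List.foldl_nil,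
      Nat.zero_add]
    have hmax' : ¬ cur.getD 0 0 =
        (((sps.lookup (ords.getD 0 0)).getD []).length : Int) - 1 := by
      simpa [pvAtMax] using hmax
    cases cur with
    | nil => exact absurd rfl hcur
    | cons a t =>
        simp only [hmax', if_false]
        simp [List.getD]
  · -- num_services ≥ 0: the scan/copy/zero loops equal the recursive carry pass
    set N := ns.toNat with hNdef
    have hNs : (N : Int) = ns := Int.toNat_of_nonneg hns
    have hsafe' : ∀ k, k < N → (∀ j, j < k → pvAtMax cur sps ords j = true) →
        pvSafe cur sps ords k = true := by
      intro k hk hj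
      set L := min cur.length ords.length with hL
      by_cases hk' : k < min N (L + 1)
      · exact hsafe k (List.mem_range.mpr hk') (fun j hjm => hj j (List.mem_range.mp hjm))
      · exfalso
        have hLk : L + 1 ≤ k := by omega
        have hsL := hsafe L (List.mem_range.mpr (by omega))
          (fun j hjm => hj j (by have := List.mem_range.mp hjm; omega))
        simp only [pvSafe, Bool.and_eq_true, decide_eq_true_eq] at hsL
        omega
    have hmain := go_eq cur sps ords ns N hNs (N + ords.length + 1) 0 (by omega)
      (by omega) hsafe' (by intro j hj; omega)
    rw [show N - 0 = N by omega] at hmain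
    rw [hmain]
    set idx := nextAssigFind cur sps ords N 0 with hidx
    have hle : idx ≤ 0 + N := find_le cur sps ords N 0
    by_cases hend : idx = N
    · have hcast : (idx : Int) = ns := by omega
      rw [if_pos hcast, if_pos hend]
    · have hlt : idx < N := by omega
      have hmax : ∀ j, j < idx → pvAtMax cur sps ords j = true := by
        intro j hj; exact find_atMax cur sps ords N 0 j (Nat.zero_le j) hj
      have hsafek := hsafe' idx (by omega) hmax
      have hcur : idx < cur.length := by
        simp only [pvSafe, Bool.and_eq_true, decide_eq_true_eq] at hsafek
        exact hsafek.1.1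
      have hne : ¬ (idx : Int) = ns := by omega
      simp only [hne, if_false, hend, if_false]
      congr 1
      have hset : cur.set idx (cur.getD idx 0 + 1) =
          cur.take idx ++ (cur.getD idx 0 + 1) :: cur.drop (idx + 1) := by
        rw [List.set_eq_take_append_cons_drop]
        simp [hcur]
      rw [foldl_set_zero idx _ (by simp [List.length_set]; omega)]
      rw [hset]
      have hlt' : (cur.take idx).length = idx := by
        simp [Nat.min_eq_left (le_of_lt hcur)]
      have hdl := List.drop_left (l₁ := cur.take idx)
        (l₂ := (cur.getD idx 0 + 1) :: cur.drop (idx + 1))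
      rw [hlt'] at hdl
      rw [hdl]
      simp
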